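-- pv_equiv track=rewrite | github.com/deeev-sb/til-2022.02 | Algorithm/Python_Algorithm/solve/section_2/solution_10.py | solution
-- ===== SOURCE A (Python) =====
-- def solution(N, num):
--     count = 0
--     answer = 0
--     for i in range(N):
--         if num[i]==1:
--             count += 1
--             answer += count
--         else:
--             count = 0
--     return answer
-- ===== SOURCE B (Python) =====
-- from itertools import groupby
--
--
-- def solution(N, num):
--     total = 0
--     for key, grp in groupby((num[i] for i in range(N)), key=lambda x: x == 1):
--         if key:
--             L = sum(1 for _ in grp)
--             total += L * (L + 1) // 2
--     return total
-- ===== Notes on version B (the rewrite author's own statement) =====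
-- stated objective: alternative
-- what changed: Replaces the per-element incremental accumulator (answer += running count on every 1) with itertools.groupby grouping the N indexed elements into maximal runs and adding the closed form L*(L+1)//2 per run of ones; like A it indexes num[i] for i in range(N), so it raises IndexError exactly where A does.
import Mathlib
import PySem

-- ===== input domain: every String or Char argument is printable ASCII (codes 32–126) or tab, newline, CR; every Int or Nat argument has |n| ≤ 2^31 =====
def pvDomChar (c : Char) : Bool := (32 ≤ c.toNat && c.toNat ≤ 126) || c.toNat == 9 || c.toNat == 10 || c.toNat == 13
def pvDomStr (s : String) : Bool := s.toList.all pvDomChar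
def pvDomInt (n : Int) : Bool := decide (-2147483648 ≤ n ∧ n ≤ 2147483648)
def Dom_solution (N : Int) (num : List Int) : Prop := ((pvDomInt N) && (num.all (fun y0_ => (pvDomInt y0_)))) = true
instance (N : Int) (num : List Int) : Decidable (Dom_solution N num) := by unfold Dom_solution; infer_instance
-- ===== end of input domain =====

-- B replaces A's incremental accumulator with a per-run closed-form sum (alternative decomposition, same cost).

-- ===== PORT A =====
def solution (N : Int) (num : List Int) : Int :=
  (((PySem.List.pyRange 0 N 1).foldl
      (fun (s : Int × Int) (i : Int) =>
        if PySem.List.pyGetD num i 0 = 1 then (s.1 + 1, s.2 + (s.1 + 1)) else (0, s.2))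
      (0, 0))).2

-- ===== PORT B =====
-- pvTri L = L * (L + 1) // 2
def pvTri (L : Int) : Int := PySem.Int.floordiv (L * (L + 1)) 2

-- one groupby step at a time: a maximal run of ones contributes pvTri of its length
def pvSumRuns : List Int → Int
  | [] => 0
  | x :: xs =>
    if x = 1 then
      pvTri (1 + ((xs.takeWhile (fun y => y == 1)).length : Int))
        + pvSumRuns (xs.dropWhile (fun y => y == 1))
    else pvSumRuns xs
termination_by xs => xs.length
decreasing_by
  · exact Nat.lt_succ_of_le (xs.length_dropWhile_le _)
  · exact Nat.lt_succ_self _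

-- B feeds groupby the generator (num[i] for i in range(N)); pyGetD stands in for num[i],
-- exact on Pre_ (where every index is in range, as in the Python)
def solution_alt (N : Int) (num : List Int) : Int :=
  pvSumRuns ((PySem.List.pyRange 0 N 1).map (fun i => PySem.List.pyGetD num i 0))

-- ===== PRECONDITION & SPEC =====
-- Pre_ excludes exactly the inputs N > len(num), on which both A and B raise IndexError.
def Pre_solution (N : Int) (num : List Int) : Prop := N ≤ (num.length : Int)
instance (N : Int) (num : List Int) : Decidable (Pre_solution N num) := by unfold Pre_solution; infer_instance
def pvWitness_solution : Int × List Int := (4, [1, 0, 1, 1, 2])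

def Spec_solution (N : Int) (num : List Int) (out : Int) : Prop := out = solution_alt N num
instance (N : Int) (num : List Int) (out : Int) : Decidable (Spec_solution N num out) := by unfold Spec_solution; infer_instance

-- ===== CLAIM (what is proved, stated in full; the proofs are below) =====
def Claim_equal_solution : Prop := ∀ (N : Int) (num : List Int), Dom_solution N num → Pre_solution N num → Spec_solution N num (solution N num)

-- ===== LEMMAS AND PROOFS =====

-- A's loop body as a function on (count, answer)
def pvStep (s : Int × Int) (v : Int) : Int × Int :=
  if v = 1 then (s.1 + 1, s.2 + (s.1 + 1)) else (0, s.2)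

-- A's answer component, as a recursion over the list with the running count
def pvHelper : List Int → Int → Int
  | [], _ => 0
  | x :: xs, c => if x = 1 then (c + 1) + pvHelper xs (c + 1) else pvHelper xs 0

lemma pvFoldl_snd (xs : List Int) : ∀ (c a : Int),
    (xs.foldl pvStep (c, a)).2 = a + pvHelper xs c := by
  induction xs with
  | nil => intro c a; simp [pvHelper]
  | cons x xs ih =>
    intro c a
    by_cases h : x = 1 <;> simp [pvStep, pvHelper, h, ih] <;> ring

lemma pvTri_double (L : Int) : 2 * pvTri L = L * (L + 1) := by
  unfold pvTri
  rw [PySem.Int.floordiv_eq_ediv_of_pos (by omega)]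
  obtain ⟨r, hr⟩ := Int.even_mul_succ_self L
  omega

-- the main invariant: pvHelper with a pending run of length c, stated multiplied by 2
lemma pvT : ∀ (n : Nat) (xs : List Int), xs.length ≤ n → ∀ c : Int, 0 ≤ c →
    2 * pvHelper xs c + c * (c + 1)
      = (c + ((xs.takeWhile (fun y => y == 1)).length : Int))
          * (c + ((xs.takeWhile (fun y => y == 1)).length : Int) + 1)
        + 2 * pvSumRuns (xs.dropWhile (fun y => y == 1)) := by
  intro n
  induction n with
  | zero =>
    intro xs hx c hc
    have : xs = [] := List.length_eq_zero_iff.mp (Nat.le_zero.mp hx)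
    subst this; simp [pvHelper, pvSumRuns]
  | succ n ih =>
    intro xs hx c hc
    match xs with
    | [] => simp [pvHelper, pvSumRuns]
    | x :: xs =>
      by_cases h : x = 1
      · subst h
        have ih' := ih xs (by simpa using Nat.lt_succ_iff.mp (Nat.lt_of_lt_of_le (Nat.lt_succ_self _) hx)) (c + 1) (by omega)
        simp only [pvHelper, List.takeWhile_cons, List.dropWhile_cons, if_pos, beq_self_eq_true,
          List.length_cons, if_true, reduceIte]
        push_cast
        linear_combination ih'
      · have hC : pvHelper xs 0 = pvSumRuns xs := by
          have hxlen : xs.length ≤ n := by simpa using Nat.lt_succ_iff.mp (Nat.lt_of_lt_of_le (Nat.lt_succ_self _) hx)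
          have t0 := ih xs hxlen 0 le_rfl
          match xs, hxlen with
          | [], _ => simp [pvHelper, pvSumRuns]
          | y :: ys, hylen =>
            by_cases hy : y = 1
            · subst hy
              simp only [List.takeWhile_cons, List.dropWhile_cons, beq_self_eq_true, if_true,
                List.length_cons, reduceIte] at t0
              have hd : 2 * pvTri (1 + ((ys.takeWhile (fun y => y == 1)).length : Int))
                  = (1 + ((ys.takeWhile (fun y => y == 1)).length : Int))
                    * (1 + ((ys.takeWhile (fun y => y == 1)).length : Int) + 1) := pvTri_double _
              simp only [pvSumRuns, if_pos rfl]
              push_cast at t0 ⊢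
              linarith [t0, hd]
            · have hyb : (y == (1 : Int)) = false := by simp [hy]
              simp only [List.takeWhile_cons, List.dropWhile_cons, hyb, if_false,
                List.length_nil, Bool.false_eq_true, reduceIte] at t0
              simp only [pvSumRuns, if_neg hy]
              simp only [pvHelper, pvSumRuns, if_neg hy] at t0 ⊢
              norm_num at t0
              omega
        have hb : (x == (1 : Int)) = false := by simp [h]
        simp only [pvHelper, if_neg h, List.takeWhile_cons, List.dropWhile_cons, hb,
          Bool.false_eq_true, reduceIte, List.length_nil]
        simp only [pvSumRuns, if_neg h]
        rw [hC]
        push_cast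
        ring

lemma pvHelper_eq_sumRuns (xs : List Int) : pvHelper xs 0 = pvSumRuns xs := by
  have t0 := pvT xs.length xs le_rfl 0 le_rfl
  match xs with
  | [] => simp [pvHelper, pvSumRuns]
  | y :: ys =>
    by_cases hy : y = 1
    · subst hy
      simp only [List.takeWhile_cons, List.dropWhile_cons, beq_self_eq_true, if_true,
        List.length_cons, reduceIte] at t0
      have hd := pvTri_double (1 + ((ys.takeWhile (fun y => y == 1)).length : Int))
      simp only [pvSumRuns, if_pos rfl]
      push_cast at t0 ⊢
      linarith [t0, hd]
    · have hyb : (y == (1 : Int)) = false := by simp [hy]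
      simp only [List.takeWhile_cons, List.dropWhile_cons, hyb, Bool.false_eq_true,
        reduceIte, List.length_nil] at t0
      simp only [pvSumRuns, if_neg hy]
      simp only [pvHelper, pvSumRuns, if_neg hy] at t0 ⊢
      norm_num at t0
      omega

-- under Pre_, B's generator list is exactly the N-element prefix of num
lemma pvMap_eq_take (N : Int) (num : List Int) (hpre : N ≤ (num.length : Int)) :
    (PySem.List.pyRange 0 N 1).map (fun i => PySem.List.pyGetD num i 0)
      = num.take (max N 0).toNat := by
  by_cases hN : N ≤ 0
  · rw [PySem.List.pyRange_one_eq_nil hN]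
    have : (max N 0).toNat = 0 := by omega
    simp [this]
  · push_neg at hN
    set xs := num.take (max N 0).toNat with hxs
    have hlen : xs.length = N.toNat := by simp [hxs]; omega
    have h1 : (PySem.List.pyRange 0 N 1).map (fun i => PySem.List.pyGetD num i 0)
        = (PySem.List.pyRange 0 N 1).map (fun i => PySem.List.pyGetD xs i 0) := by
      apply List.map_congr_left
      intro i hi
      have hi' := (PySem.List.mem_pyRange_one).mp hi
      have h1 : PySem.List.pyGetD num i 0 = num[i.toNat]'(by omega) :=
        PySem.List.pyGetD_eq_getElem _ _ hi'.1 (by omega)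
      have h2 : PySem.List.pyGetD xs i 0 = xs[i.toNat]'(by omega) :=
        PySem.List.pyGetD_eq_getElem _ _ hi'.1 (by omega)
      have h3 : xs[i.toNat]'(by omega) = num[i.toNat]'(by omega) := by simp [hxs]
      rw [h1, h2, h3]
    have hrange : PySem.List.pyRange 0 N 1 = PySem.List.pyRange 0 (xs.length : Int) 1 := by
      rw [hlen]; congr 1; omega
    rw [h1, hrange, PySem.List.map_pyGetD_pyRange_zero' xs 0]

lemma pvSolution_eq (N : Int) (num : List Int) (hpre : N ≤ (num.length : Int)) :
    solution N num = solution_alt N num := by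
  unfold solution solution_alt
  rw [pvMap_eq_take N num hpre]
  by_cases hN : N ≤ 0
  · rw [PySem.List.pyRange_one_eq_nil hN]
    have : (max N 0).toNat = 0 := by omega
    simp [this, pvSumRuns]
  · push_neg at hN
    set xs := num.take (max N 0).toNat with hxs
    have hlen : xs.length = N.toNat := by simp [hxs]; omega
    have hrange : PySem.List.pyRange 0 N 1 = PySem.List.pyRange 0 (xs.length : Int) 1 := by
      rw [hlen]; congr 1; omega
    have hcongr : (PySem.List.pyRange 0 N 1).foldl
        (fun (s : Int × Int) (i : Int) =>
          if PySem.List.pyGetD num i 0 = 1 then (s.1 + 1, s.2 + (s.1 + 1)) else (0, s.2)) (0, 0)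
        = (PySem.List.pyRange 0 N 1).foldl
        (fun (s : Int × Int) (i : Int) =>
          if PySem.List.pyGetD xs i 0 = 1 then (s.1 + 1, s.2 + (s.1 + 1)) else (0, s.2)) (0, 0) := by
      apply PySem.List.foldl_congr_mem
      intro acc i hi
      have hi' := (PySem.List.mem_pyRange_one).mp hi
      have h1 : PySem.List.pyGetD num i 0 = num[i.toNat] :=
        PySem.List.pyGetD_eq_getElem _ _ hi'.1 (by omega)
      have h2 : PySem.List.pyGetD xs i 0 = xs[i.toNat]'(by omega) :=
        PySem.List.pyGetD_eq_getElem _ _ hi'.1 (by omega)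
      have h3 : xs[i.toNat]'(by omega) = num[i.toNat]'(by omega) := by
        simp [hxs]
      rw [h1, h2, h3]
    rw [hcongr, hrange]
    rw [PySem.List.foldl_pyRange_zero_pyGetD' xs 0
      (fun (s : Int × Int) (v : Int) => if v = 1 then (s.1 + 1, s.2 + (s.1 + 1)) else (0, s.2)) (0, 0)]
    rw [show (fun (s : Int × Int) (v : Int) => if v = 1 then (s.1 + 1, s.2 + (s.1 + 1)) else (0, s.2)) = pvStep from rfl]
    rw [pvFoldl_snd xs 0 0, pvHelper_eq_sumRuns]
    ring

-- ===== VERDICT (by name: the statement is the Claim_ definition above) =====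
theorem solution_spec : Claim_equal_solution := by
  intro N num _ hpre
  unfold Spec_solution
  exact pvSolution_eq N num hpre
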